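-- pv_equiv track=rewrite | github.com/ABsintio/PyChess | src/ui/chesstable/table.py | isLegal_bishop_move
-- ===== SOURCE A (Python) =====
-- def isLegal_bishop_move(x_from, y_from, x_to, y_to):
--     delta_xprime_a = abs(0 - x_from) + 1
--     delta_yprime_a = abs(8 - y_from)
--     delta_xsecond_a = abs(x_from - 8)
--     delta_ysecond_a = abs(y_from - 0) + 1
--     range_Mno = range(1, min(delta_xprime_a, delta_ysecond_a))
--     range_Mso = range(1, min(delta_xprime_a, delta_yprime_a))
--     range_Mne = range(1, min(delta_xsecond_a, delta_ysecond_a))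
--     range_Mse = range(1, min(delta_xsecond_a, delta_yprime_a))
--     return (x_to, y_to) in [(x_from - i, y_from - i) for i in range_Mno] or \
--            (x_to, y_to) in [(x_from - i, y_from + i) for i in range_Mso] or \
--            (x_to, y_to) in [(x_from + i, y_from - i) for i in range_Mne] or \
--            (x_to, y_to) in [(x_from + i, y_from + i) for i in range_Mse]
-- ===== SOURCE B (Python) =====
-- def isLegal_bishop_move(x_from, y_from, x_to, y_to):
--     dx = x_to - x_from
--     dy = y_to - y_from
--     if dx == 0 or abs(dx) != abs(dy):
--         return False
--     x_bound = abs(x_from) + 1 if dx < 0 else abs(x_from - 8)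
--     y_bound = abs(y_from) + 1 if dy < 0 else abs(8 - y_from)
--     return abs(dx) < min(x_bound, y_bound)
-- ===== Notes on version B (the rewrite author's own statement) =====
-- stated objective: faster
-- what changed: Replaces the four materialised diagonal lists and linear membership scans with a constant-time arithmetic check: |dx|==|dy|, dx!=0, and the step below the per-direction bound.
import Mathlib
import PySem

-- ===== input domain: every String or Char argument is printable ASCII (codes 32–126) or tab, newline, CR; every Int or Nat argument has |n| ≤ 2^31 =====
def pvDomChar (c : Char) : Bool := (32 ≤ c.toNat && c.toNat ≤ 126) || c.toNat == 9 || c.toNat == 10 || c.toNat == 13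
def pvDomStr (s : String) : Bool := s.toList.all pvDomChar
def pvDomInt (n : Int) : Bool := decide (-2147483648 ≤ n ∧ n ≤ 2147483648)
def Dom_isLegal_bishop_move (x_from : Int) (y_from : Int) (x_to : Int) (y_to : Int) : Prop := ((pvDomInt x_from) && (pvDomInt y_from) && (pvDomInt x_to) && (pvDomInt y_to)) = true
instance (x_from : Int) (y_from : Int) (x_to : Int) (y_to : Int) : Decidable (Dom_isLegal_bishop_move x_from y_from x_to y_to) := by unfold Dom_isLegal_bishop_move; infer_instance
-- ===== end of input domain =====

-- B replaces A's four materialised diagonal lists and linear membership scans by a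
-- constant-time arithmetic check (objective: faster, O(1) vs O(|x_from|+|y_from|)).

-- ===== PORT A =====
def isLegal_bishop_move (x_from : Int) (y_from : Int) (x_to : Int) (y_to : Int) : Bool :=
  let delta_xprime_a := |0 - x_from| + 1
  let delta_yprime_a := |8 - y_from|
  let delta_xsecond_a := |x_from - 8|
  let delta_ysecond_a := |y_from - 0| + 1
  let range_Mno := PySem.List.pyRange 1 (min delta_xprime_a delta_ysecond_a) 1
  let range_Mso := PySem.List.pyRange 1 (min delta_xprime_a delta_yprime_a) 1
  let range_Mne := PySem.List.pyRange 1 (min delta_xsecond_a delta_ysecond_a) 1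
  let range_Mse := PySem.List.pyRange 1 (min delta_xsecond_a delta_yprime_a) 1
  decide ((x_to, y_to) ∈ range_Mno.map (fun i => (x_from - i, y_from - i))) ||
  decide ((x_to, y_to) ∈ range_Mso.map (fun i => (x_from - i, y_from + i))) ||
  decide ((x_to, y_to) ∈ range_Mne.map (fun i => (x_from + i, y_from - i))) ||
  decide ((x_to, y_to) ∈ range_Mse.map (fun i => (x_from + i, y_from + i)))

-- ===== PORT B =====
def isLegal_bishop_move_alt (x_from : Int) (y_from : Int) (x_to : Int) (y_to : Int) : Bool :=
  let dx := x_to - x_from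
  let dy := y_to - y_from
  if dx = 0 ∨ |dx| ≠ |dy| then false
  else
    let x_bound := if dx < 0 then |x_from| + 1 else |x_from - 8|
    let y_bound := if dy < 0 then |y_from| + 1 else |8 - y_from|
    decide (|dx| < min x_bound y_bound)

-- ===== PRECONDITION & SPEC =====
def Spec_isLegal_bishop_move (x_from : Int) (y_from : Int) (x_to : Int) (y_to : Int) (out : Bool) : Prop := out = isLegal_bishop_move_alt x_from y_from x_to y_to
instance (x_from : Int) (y_from : Int) (x_to : Int) (y_to : Int) (out : Bool) : Decidable (Spec_isLegal_bishop_move x_from y_from x_to y_to out) := by unfold Spec_isLegal_bishop_move; infer_instance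

-- ===== CLAIM (what is proved, stated in full; the proofs are below) =====
def Claim_equal_isLegal_bishop_move : Prop := ∀ (x_from : Int) (y_from : Int) (x_to : Int) (y_to : Int), Dom_isLegal_bishop_move x_from y_from x_to y_to → Spec_isLegal_bishop_move x_from y_from x_to y_to (isLegal_bishop_move x_from y_from x_to y_to)

-- ===== LEMMAS AND PROOFS =====
theorem isLegal_bishop_move_eq_alt (x_from y_from x_to y_to : Int) :
    isLegal_bishop_move x_from y_from x_to y_to = isLegal_bishop_move_alt x_from y_from x_to y_to := by
  rw [Bool.eq_iff_iff]
  simp only [isLegal_bishop_move, isLegal_bishop_move_alt, Bool.or_eq_true, decide_eq_true_eq,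
    List.mem_map, PySem.List.mem_pyRange_one, Prod.mk.injEq, Int.abs_eq_natAbs]
  constructor
  · rintro (⟨i, ⟨h1, h2⟩, hx, hy⟩ | ⟨i, ⟨h1, h2⟩, hx, hy⟩ | ⟨i, ⟨h1, h2⟩, hx, hy⟩ | ⟨i, ⟨h1, h2⟩, hx, hy⟩) <;>
    · rw [if_neg (by omega), decide_eq_true_eq]
      split_ifs <;> omega
  · intro h
    by_cases hc : (x_to - x_from = 0 ∨ ((x_to - x_from).natAbs : ℤ) ≠ ((y_to - y_from).natAbs : ℤ))
    · rw [if_pos hc] at h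
      exact (Bool.false_ne_true h).elim
    · rw [if_neg hc, decide_eq_true_eq] at h
      rw [not_or, not_not] at hc
      obtain ⟨hdx, habs⟩ := hc
      split_ifs at h with hxs hys hys
      · exact Or.inl (Or.inl (Or.inl ⟨x_from - x_to, ⟨by omega, by omega⟩, by omega, by omega⟩))
      · exact Or.inl (Or.inl (Or.inr ⟨x_from - x_to, ⟨by omega, by omega⟩, by omega, by omega⟩))
      · exact Or.inl (Or.inr ⟨x_to - x_from, ⟨by omega, by omega⟩, by omega, by omega⟩)
      · exact Or.inr ⟨x_to - x_from, ⟨by omega, by omega⟩, by omega, by omega⟩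

-- ===== VERDICT (by name: the statement is the Claim_ definition above) =====
theorem isLegal_bishop_move_spec : Claim_equal_isLegal_bishop_move := by
  intro x_from y_from x_to y_to _
  exact isLegal_bishop_move_eq_alt x_from y_from x_to y_to
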